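-- pv_equiv track=rewrite | github.com/wanglongjiang/leetcode | medium/816-ambiguous-coordinates.py | numComp
-- ===== SOURCE A (Python) =====
-- def numComp(s):  # 生成数值组合
--     if len(s) == 1:
--         return [s]
--     if s[0] == '0':  # 0开头的，肯定只有1种选择
--         return ['0.' + s[1:]]
--     ans = [s]
--     for i in range(1, len(s)):  # 尝试添加小数点
--         if int(s[i:]) == 0:  # 小数点后面是0的，不是合法数字
--             break
--         ans.append(s[:i] + '.' + s[i:])
--     return ans
-- ===== SOURCE B (Python) =====
-- def numComp(s):
--     if len(s) == 1:
--         return [s]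
--     if s[0] == '0':
--         return ['0.' + s[1:]]
--     acc = []
--     nonzero = False
--     for i in range(len(s) - 1, 0, -1):
--         nonzero = nonzero or s[i] != '0'
--         if nonzero:
--             acc = [s[:i] + '.' + s[i:]] + acc
--     return [s] + acc
-- ===== Notes on version B (the rewrite author's own statement) =====
-- stated objective: alternative
-- what changed: B scans the string right-to-left once, maintaining a seen-nonzero flag and building the decimal-point placements back-to-front by prepending, instead of A's forward loop that int-parses each suffix and breaks at the first all-zero one.
-- outside the precondition, e.g. on numComp(''): A raises IndexError, B raises IndexError; on numComp('10_0'): A returns ['10_0'], B returns ['10_0', '1.0_0', '10._0']; on numComp('5 0'): A returns ['5 0'], B returns ['5 0', '5. 0']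
import Mathlib
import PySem

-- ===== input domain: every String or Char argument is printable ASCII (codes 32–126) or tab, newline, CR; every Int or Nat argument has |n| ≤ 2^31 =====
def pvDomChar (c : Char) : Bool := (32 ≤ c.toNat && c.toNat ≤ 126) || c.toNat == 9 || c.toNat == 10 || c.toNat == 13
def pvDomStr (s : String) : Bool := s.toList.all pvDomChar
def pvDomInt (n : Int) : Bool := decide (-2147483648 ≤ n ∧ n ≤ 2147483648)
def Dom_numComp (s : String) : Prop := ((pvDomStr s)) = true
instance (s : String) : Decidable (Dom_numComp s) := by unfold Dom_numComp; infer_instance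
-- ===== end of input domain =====

-- B scans the string right-to-left once with a seen-nonzero flag, building the decimal-point
-- placements back-to-front by prepending, instead of A's forward int(s[i:])==0 parse-and-break loop.

-- ===== PORT A =====
-- hand port of int(x): Python's decimal parse restricted to nonempty digit-only strings —
-- exact on every argument reachable inside Pre_numComp (there s[i:] is a nonempty digit string);
-- none = ValueError.
def pyIntDigits? (cs : List Char) : Option Int :=
  if cs ≠ [] ∧ cs.all Char.isDigit then
    some (cs.foldl (fun a c => 10 * a + ((c.toNat : Int) - 48)) 0)
  else none

-- the for-loop of A over range(1, len(s)) with its break and its ans accumulator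
def numCompGo (cs : List Char) (idxs : List Int) (ans : List String) : List String :=
  match idxs with
  | [] => ans
  | i :: rest =>
    match pyIntDigits? (PySem.List.slice cs (some i) none) with
    | none => ans   -- int() raises ValueError here; unreachable inside Pre_numComp
    | some v =>
      if v = 0 then ans   -- the break
      else numCompGo cs rest
        (ans ++ [String.ofList (PySem.List.slice cs none (some i) ++ '.' :: PySem.List.slice cs (some i) none)])

def numComp (s : String) : List String :=
  if PySem.Str.len s = 1 then [s]
  else
    match PySem.Str.pyGet? s 0 with
    | none => []   -- s[0] raises IndexError on ""; unreachable inside Pre_numComp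
    | some c =>
      if c = '0' then [String.ofList ('0' :: '.' :: PySem.List.slice s.toList (some 1) none)]
      else numCompGo s.toList (PySem.List.pyRange 1 (PySem.Str.len s)) [s]

-- ===== PORT B =====
-- for i in range(len(s)-1, 0, -1): nonzero = nonzero or s[i] != '0'; if nonzero: acc = [s[:i]+'.'+s[i:]] + acc
-- (s[i] is always in range inside the loop, so Str.pyGet? never returns none there)
def numComp_alt (s : String) : List String :=
  if PySem.Str.len s = 1 then [s]
  else if PySem.Str.pyGet? s 0 = some '0' then
    [String.ofList ('0' :: '.' :: s.toList.tail)]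
  else
    let res := (PySem.List.pyRange (PySem.Str.len s - 1) 0 (-1)).foldl
      (fun (st : Bool × List String) j =>
        let nz := st.1 || decide (PySem.Str.pyGet? s j ≠ some '0')
        (nz, if nz then
          String.ofList (PySem.List.slice s.toList none (some j) ++ '.' :: PySem.List.slice s.toList (some j) none) :: st.2
        else st.2))
      (false, [])
    s :: res.2

-- ===== PRECONDITION & SPEC =====
-- Pre_ excludes "" (A raises IndexError) and multi-char strings whose tail is not digit-only
-- (past the two guards A feeds s[i:] to int(), which either raises ValueError or accepts
-- whitespace/underscore int-forms that B's per-character '0'-test does not model).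
def Pre_numComp (s : String) : Prop :=
  s.toList ≠ [] ∧
    (s.toList.length = 1 ∨ s.toList[0]? = some '0' ∨ s.toList.tail.all Char.isDigit = true)
instance (s : String) : Decidable (Pre_numComp s) := by unfold Pre_numComp; infer_instance
def pvWitness_numComp : String := "123"

def Spec_numComp (s : String) (out : List String) : Prop := out = numComp_alt s
instance (s : String) (out : List String) : Decidable (Spec_numComp s out) := by unfold Spec_numComp; infer_instance

-- ===== CLAIM (what is proved, stated in full; the proofs are below) =====
def Claim_equal_numComp : Prop := ∀ (s : String), Dom_numComp s → Pre_numComp s → Spec_numComp s (numComp s)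

-- ===== LEMMAS AND PROOFS =====

-- proof-side helper: the trailing-zero boundary (s with trailing '0's removed)
def rstripZeros (cs : List Char) : List Char :=
  (cs.reverse.dropWhile (fun c => c == '0')).reverse

-- a digit character is exactly one of '0'..'9'; c = '0' ↔ its code is 48
lemma digit_code_zero {c : Char} (h : c.isDigit = true) :
    (48 ≤ c.toNat ∧ c.toNat ≤ 57) ∧ (c = '0' ↔ c.toNat = 48) := by
  simp [Char.isDigit] at h
  refine ⟨⟨h.1, h.2⟩, ?_, ?_⟩
  · rintro rfl; rfl
  · intro hn
    apply Char.ext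
    apply UInt32.toNat_inj.mp
    exact hn

-- the accumulator fold is zero iff the accumulator is zero and all digits are '0'
lemma foldl_digits_eq_zero (ds : List Char) (h : ds.all Char.isDigit = true) :
    ∀ acc : Int, 0 ≤ acc →
      (ds.foldl (fun a c => 10 * a + ((c.toNat : Int) - 48)) acc = 0 ↔
        (acc = 0 ∧ ∀ c ∈ ds, c = '0')) := by
  induction ds with
  | nil => intro acc _; simp
  | cons c rest ih =>
    intro acc hacc
    simp only [List.all_cons, Bool.and_eq_true] at h
    obtain ⟨⟨hlo, hhi⟩, hzero⟩ := digit_code_zero h.1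
    have hrest := ih h.2
    have hnn : (0:Int) ≤ 10 * acc + ((c.toNat : Int) - 48) := by omega
    rw [List.foldl_cons, hrest _ hnn]
    constructor
    · rintro ⟨ha, hall⟩
      have : acc = 0 ∧ (c.toNat : Int) = 48 := by omega
      refine ⟨this.1, ?_⟩
      intro x hx
      rcases List.mem_cons.mp hx with rfl | hx'
      · exact hzero.mpr (by exact_mod_cast this.2)
      · exact hall x hx'
    · rintro ⟨ha, hall⟩
      have hc : c = '0' := hall c (by simp)
      have : (c.toNat : Int) = 48 := by exact_mod_cast hzero.mp hc
      refine ⟨by omega, fun x hx => hall x (by simp [hx])⟩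

lemma pyIntDigits?_spec (ds : List Char) (hne : ds ≠ []) (h : ds.all Char.isDigit = true) :
    ∃ v, pyIntDigits? ds = some v ∧ (v = 0 ↔ ∀ c ∈ ds, c = '0') := by
  refine ⟨ds.foldl (fun a c => 10 * a + ((c.toNat : Int) - 48)) 0,
    by simp [pyIntDigits?, hne, h], ?_⟩
  simpa using foldl_digits_eq_zero ds h 0 le_rfl

-- rstrip decomposition: cs = (rstripZeros cs) ++ zeros, and rstripZeros ends in a non-'0'
lemma rstrip_decomp (cs : List Char) :
    cs = rstripZeros cs ++ List.replicate (cs.length - (rstripZeros cs).length) '0' ∧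
      (rstripZeros cs).length ≤ cs.length ∧
      ∀ h : rstripZeros cs ≠ [], (rstripZeros cs).getLast h ≠ '0' := by
  have hsplit : cs.reverse.takeWhile (fun c => c == '0') ++ cs.reverse.dropWhile (fun c => c == '0') = cs.reverse :=
    List.takeWhile_append_dropWhile
  have hcs : cs = rstripZeros cs ++ (cs.reverse.takeWhile (fun c => c == '0')).reverse := by
    unfold rstripZeros
    calc cs = cs.reverse.reverse := (List.reverse_reverse cs).symm
    _ = (cs.reverse.takeWhile (fun c => c == '0') ++ cs.reverse.dropWhile (fun c => c == '0')).reverse := by rw [hsplit]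
    _ = _ := by rw [List.reverse_append]
  have htake : (cs.reverse.takeWhile (fun c => c == '0')).reverse
      = List.replicate (cs.reverse.takeWhile (fun c => c == '0')).reverse.length '0' := by
    apply List.eq_replicate_of_mem
    intro b hb
    have hb' := List.mem_reverse.mp hb
    have := List.mem_takeWhile_imp hb'
    simpa using this
  have hlen : (rstripZeros cs).length ≤ cs.length := by
    conv_rhs => rw [hcs]
    simp
  refine ⟨?_, hlen, ?_⟩
  · have hlsum : cs.length = (rstripZeros cs).length + (cs.reverse.takeWhile (fun c => c == '0')).reverse.length := by
      conv_lhs => rw [hcs]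
      simp
    have hz : cs.length - (rstripZeros cs).length = (cs.reverse.takeWhile (fun c => c == '0')).reverse.length := by
      omega
    rw [hz]
    conv_lhs => rw [hcs]
    rw [htake]
    simp
  · intro h hlast
    unfold rstripZeros at h hlast
    have hne : cs.reverse.dropWhile (fun c => c == '0') ≠ [] := by
      intro hz; rw [hz] at h; simp at h
    have hhead := List.head_dropWhile_not (fun c => c == '0') hne
    rw [List.getLast_reverse] at hlast
    simp [hlast] at hhead

-- the suffix cs.drop i is all-'0' iff i is at or past the rstrip boundary
lemma drop_all_zero_iff (cs : List Char) (i : Nat)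
    (hr : rstripZeros cs ≠ []) :
    ((∀ c ∈ cs.drop i, c = '0') ↔ (rstripZeros cs).length ≤ i) := by
  obtain ⟨hcs, hlen, hlast⟩ := rstrip_decomp cs
  constructor
  · intro hall
    by_contra hlt
    push Not at hlt
    have hdni : (rstripZeros cs).drop i ≠ [] := by
      intro hz
      have := List.length_eq_zero_iff.mpr hz
      simp at this
      omega
    have hsplitdrop : cs.drop i = (rstripZeros cs).drop i ++ List.replicate (cs.length - (rstripZeros cs).length) '0' := by
      conv_lhs => rw [hcs]
      exact List.drop_append_of_le_length (le_of_lt hlt)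
    have hmem : (rstripZeros cs).getLast hr ∈ cs.drop i := by
      rw [hsplitdrop]
      apply List.mem_append_left
      rw [← List.getLast_drop hdni]
      exact List.getLast_mem hdni
    exact hlast hr (hall _ hmem)
  · intro hle c hc
    rw [hcs, List.drop_append] at hc
    rcases List.mem_append.mp hc with h1 | h2
    · have : (rstripZeros cs).drop i = [] := by
        apply List.drop_eq_nil_of_le hle
      simp [this] at h1
    · exact List.eq_of_mem_replicate (List.mem_of_mem_drop h2)

-- the head of cs is not '0' → the rstrip result is nonempty
lemma rstrip_ne_nil (cs : List Char) (c : Char) (h0 : cs[0]? = some c) (hc : c ≠ '0') :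
    rstripZeros cs ≠ [] := by
  obtain ⟨hcs, hlen, hlast⟩ := rstrip_decomp cs
  intro hz
  rw [hz, List.nil_append] at hcs
  have hmem : c ∈ cs := List.mem_of_getElem? h0
  rw [hcs] at hmem
  exact hc (List.eq_of_mem_replicate hmem)

-- A's loop invariant: from index j (1 ≤ j ≤ r, j + k = n) the loop appends exactly
-- the placements at positions j, …, r-1
lemma numCompGo_spec (cs : List Char) (hd : cs.tail.all Char.isDigit = true)
    (hr : rstripZeros cs ≠ []) :
    ∀ (k j : Nat) (ans : List String), 1 ≤ j → j ≤ (rstripZeros cs).length → j + k = cs.length →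
      numCompGo cs (PySem.List.pyRange (j : Int) (cs.length : Int)) ans =
        ans ++ (List.range' j ((rstripZeros cs).length - j)).map
          (fun i => String.ofList (cs.take i ++ '.' :: cs.drop i)) := by
  intro k
  induction k with
  | zero =>
    intro j ans h1 h2 h3
    have hrle : (rstripZeros cs).length ≤ cs.length := (rstrip_decomp cs).2.1
    have hjr : (rstripZeros cs).length = j := by omega
    have hemp : PySem.List.pyRange (j : Int) (cs.length : Int) = [] := by
      rw [PySem.List.pyRange_one]
      have : ((cs.length : Int) - j).toNat = 0 := by omega
      rw [this]
      simp
    rw [hemp, hjr]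
    simp [numCompGo]
  | succ k ih =>
    intro j ans h1 h2 h3
    have hjn : (j : Int) < (cs.length : Int) := by exact_mod_cast (by omega : j < cs.length)
    rw [PySem.List.pyRange_one_cons hjn]
    rw [numCompGo, PySem.List.slice_from_natCast, PySem.List.slice_to_natCast]
    have hdropne : cs.drop j ≠ [] := by
      intro hz
      have := congrArg List.length hz
      simp at this
      omega
    have hdig : (cs.drop j).all Char.isDigit = true := by
      have hstep : cs.drop j = cs.tail.drop (j - 1) := by
        rw [List.drop_tail]
        congr 1
        omega
      rw [hstep]
      exact List.all_eq_true.mpr fun c hc =>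
        List.all_eq_true.mp hd c (List.mem_of_mem_drop hc)
    obtain ⟨v, hv, hv0⟩ := pyIntDigits?_spec _ hdropne hdig
    rw [hv]
    dsimp only
    by_cases hcase : (rstripZeros cs).length ≤ j
    · have hjr : j = (rstripZeros cs).length := le_antisymm h2 hcase
      have hv' : v = 0 := hv0.mpr fun c hc => (drop_all_zero_iff cs j hr).mpr hcase c hc
      rw [if_pos hv', ← hjr]
      simp
    · push Not at hcase
      have hvne : ¬ v = 0 := by
        intro hz
        have := (drop_all_zero_iff cs j hr).mp (hv0.mp hz)
        omega
      rw [if_neg hvne]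
      have hcast : (j : Int) + 1 = ((j + 1 : Nat) : Int) := by push_cast; ring
      rw [hcast, ih (j + 1) _ (by omega) (by omega) (by omega)]
      have hsucc : (rstripZeros cs).length - j = ((rstripZeros cs).length - (j + 1)) + 1 := by omega
      rw [hsucc, List.range'_succ]
      simp

-- B's loop invariant: descending from index i with the state for suffix i+1, the fold over
-- [i, i-1, …, 1] lands in the state for suffix 1 (flag = "suffix has a nonzero", acc built back-to-front)
lemma numCompAltGo_spec (s : String) (hr : rstripZeros s.toList ≠ []) :
    ∀ (i : Nat), i < s.toList.length →
      (PySem.List.pyRange (i : Int) 0 (-1)).foldl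
        (fun (st : Bool × List String) j =>
          let nz := st.1 || decide (PySem.Str.pyGet? s j ≠ some '0')
          (nz, if nz then
            String.ofList (PySem.List.slice s.toList none (some j) ++ '.' :: PySem.List.slice s.toList (some j) none) :: st.2
          else st.2))
        (decide (i + 1 < (rstripZeros s.toList).length),
         (List.range' (i + 1) ((rstripZeros s.toList).length - (i + 1))).map
           (fun k => String.ofList (s.toList.take k ++ '.' :: s.toList.drop k))) =
      (decide (1 < (rstripZeros s.toList).length),
       (List.range' 1 ((rstripZeros s.toList).length - 1)).map
         (fun k => String.ofList (s.toList.take k ++ '.' :: s.toList.drop k))) := by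
  intro i
  induction i with
  | zero =>
    intro _
    rw [PySem.List.pyRange_neg_one_eq_nil (by norm_num)]
    simp
  | succ i ih =>
    intro hin
    have hcons : PySem.List.pyRange ((i + 1 : Nat) : Int) 0 (-1) =
        ((i + 1 : Nat) : Int) :: PySem.List.pyRange (((i + 1 : Nat) : Int) - 1) 0 (-1) :=
      PySem.List.pyRange_neg_one_cons (by exact_mod_cast Nat.succ_pos i)
    have hcast : ((i + 1 : Nat) : Int) - 1 = (i : Int) := by push_cast; ring
    rw [hcons, hcast, List.foldl_cons]
    have hget : PySem.Str.pyGet? s ((i + 1 : Nat) : Int) = s.toList[(i + 1)]? := by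
      simpa using PySem.Str.pyGet?_natCast s (i + 1)
    have hlt : i + 1 < s.toList.length := hin
    have helem : s.toList[(i + 1)]? = some (s.toList[i + 1]'hlt) := List.getElem?_eq_getElem hlt
    have hdropcons : s.toList.drop (i + 1) = s.toList[i + 1]'hlt :: s.toList.drop (i + 2) :=
      List.drop_eq_getElem_cons hlt
    -- the flag update: suffix (i+1) has a nonzero  ↔  suffix (i+2) has one or s[i+1] ≠ '0'
    have hkey : (i + 1 < (rstripZeros s.toList).length) ↔
        (i + 1 + 1 < (rstripZeros s.toList).length ∨ ¬ s.toList[i + 1]'hlt = '0') := by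
      constructor
      · intro hlt'
        by_cases hz : s.toList[i + 1]'hlt = '0'
        · left
          by_contra hge
          have hall1 : ∀ c ∈ s.toList.drop (i + 1), c = '0' := by
            intro c hcm
            rw [hdropcons] at hcm
            rcases List.mem_cons.mp hcm with rfl | hcm'
            · exact hz
            · exact (drop_all_zero_iff s.toList (i + 2) hr).mpr (by omega) c hcm'
          have := (drop_all_zero_iff s.toList (i + 1) hr).mp hall1
          omega
        · right; exact hz
      · rintro (h | h)
        · omega
        · by_contra hge
          apply h
          refine (drop_all_zero_iff s.toList (i + 1) hr).mpr (by omega) _ ?_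
          rw [hdropcons]
          exact List.mem_cons_self
    have hflag : ((decide (i + 1 + 1 < (rstripZeros s.toList).length)) ||
        decide (PySem.Str.pyGet? s ((i + 1 : Nat) : Int) ≠ some '0')) =
        decide (i + 1 < (rstripZeros s.toList).length) := by
      by_cases hmlt : i + 1 < (rstripZeros s.toList).length
      · rw [decide_eq_true hmlt]
        rcases hkey.mp hmlt with h | h
        · rw [decide_eq_true h, Bool.true_or]
        · rw [hget, helem]
          have hne : (some (s.toList[i + 1]'hlt) ≠ some '0') := by simpa using h
          rw [decide_eq_true hne, Bool.or_true]
      · rw [decide_eq_false hmlt]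
        have h1f : ¬ (i + 1 + 1 < (rstripZeros s.toList).length) := fun h => hmlt (hkey.mpr (Or.inl h))
        have hz : s.toList[i + 1]'hlt = '0' := by
          by_contra h; exact hmlt (hkey.mpr (Or.inr h))
        rw [decide_eq_false h1f, hget, helem, hz]
        simp
    dsimp only
    rw [hflag]
    rw [PySem.List.slice_to_natCast, PySem.List.slice_from_natCast]
    by_cases hc : i + 1 < (rstripZeros s.toList).length
    · rw [decide_eq_true hc, if_pos rfl]
      have hsucc : (rstripZeros s.toList).length - (i + 1) =
          ((rstripZeros s.toList).length - (i + 1 + 1)) + 1 := by omega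
      have hgoal := ih (by omega)
      rw [decide_eq_true hc, hsucc, List.range'_succ, List.map_cons] at hgoal
      exact hgoal
    · rw [decide_eq_false hc, if_neg (by simp)]
      have h1z : (rstripZeros s.toList).length - (i + 1) = 0 := by omega
      have h2z : (rstripZeros s.toList).length - (i + 1 + 1) = 0 := by omega
      rw [h2z]
      have hgoal := ih (by omega)
      rw [h1z, decide_eq_false hc] at hgoal
      simpa using hgoal

-- ===== VERDICT (by name: the statement is the Claim_ definition above) =====
theorem numComp_spec : Claim_equal_numComp := by
  unfold Claim_equal_numComp
  intro s _ hpre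
  unfold Spec_numComp
  obtain ⟨hne, hdisj⟩ := hpre
  have hlen : PySem.Str.len s = (s.toList.length : Int) := by
    simp [PySem.Str.len]
  have h0 : PySem.Str.pyGet? s 0 = s.toList[0]? := by
    simpa using PySem.Str.pyGet?_natCast s 0
  obtain ⟨c, hc⟩ : ∃ c, s.toList[0]? = some c := by
    cases hcs : s.toList with
    | nil => exact absurd hcs hne
    | cons a l => exact ⟨a, by simp⟩
  unfold numComp numComp_alt
  by_cases h1 : PySem.Str.len s = 1
  · rw [if_pos h1, if_pos h1]
  · rw [if_neg h1, if_neg h1, h0, hc]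
    by_cases hz : c = '0'
    · subst hz
      rw [if_pos rfl]
      dsimp only
      rw [if_pos rfl, PySem.List.slice_from_one]
    · rw [if_neg (by simpa using hz)]
      dsimp only
      rw [if_neg hz]
      have hlnat : s.toList.length ≠ 1 := by
        intro h
        apply h1
        rw [hlen, h]
        rfl
      have hd : s.toList.tail.all Char.isDigit = true := by
        rcases hdisj with h | h | h
        · exact absurd h hlnat
        · rw [h] at hc; exact absurd (Option.some.inj hc).symm hz
        · exact h
      have hr : rstripZeros s.toList ≠ [] := rstrip_ne_nil s.toList c hc hz
      have hge1 : 1 ≤ s.toList.length := by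
        cases hcs : s.toList with
        | nil => exact absurd hcs hne
        | cons a l => simp
      have hge2 : 2 ≤ s.toList.length := by omega
      have hrge1 : 1 ≤ (rstripZeros s.toList).length := by
        cases hts : rstripZeros s.toList with
        | nil => exact absurd hts hr
        | cons a l => simp
      have hrle : (rstripZeros s.toList).length ≤ s.toList.length := (rstrip_decomp s.toList).2.1
      -- A side
      have hrangeA : PySem.List.pyRange 1 (PySem.Str.len s) =
          PySem.List.pyRange ((1 : Nat) : Int) ((s.toList.length : Nat) : Int) := by
        rw [hlen]; norm_num
      rw [hrangeA,
        numCompGo_spec s.toList hd hr (s.toList.length - 1) 1 [s] le_rfl hrge1 (by omega)]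
      -- B side
      have hboundB : PySem.Str.len s - 1 = ((s.toList.length - 1 : Nat) : Int) := by
        rw [hlen]; omega
      rw [hboundB]
      have hinit :
          ((false : Bool), ([] : List String)) =
          (decide ((s.toList.length - 1) + 1 < (rstripZeros s.toList).length),
           (List.range' ((s.toList.length - 1) + 1)
              ((rstripZeros s.toList).length - ((s.toList.length - 1) + 1))).map
             (fun k => String.ofList (s.toList.take k ++ '.' :: s.toList.drop k))) := by
      -- (n-1)+1 = n, m ≤ n: flag false, acc empty
        have hn : (s.toList.length - 1) + 1 = s.toList.length := by omega
        rw [hn]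
        have hz1 : ¬ (s.toList.length < (rstripZeros s.toList).length) := by omega
        have hz2 : (rstripZeros s.toList).length - s.toList.length = 0 := by omega
        rw [decide_eq_false hz1, hz2]
        simp
      rw [hinit, numCompAltGo_spec s hr (s.toList.length - 1) (by omega)]
      simp
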